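-- pv_equiv track=rewrite | github.com/grahamgower/island_thrush_scripts | plotting_scripts/display_name.py | italicise_display_name
-- ===== SOURCE A (Python) =====
-- def italicise_display_name(name):
--     it_name = ["\\emph{"]
--     state = 1
--     for field in name.split(" "):
--         if state == 1 and (field.startswith("(") or field in ("ssp", "AMNH", "ZMUC")):
--                 it_name.append("}")
--                 state = 0
--         it_name.append(field)
--     if state == 1:
--         it_name.append("}")
--     disp_name = " ".join(it_name)
--     disp_name = disp_name.replace("{ ", "{")
--     disp_name = disp_name.replace(" }", "}")
--     return disp_name
-- ===== SOURCE B (Python) =====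
-- def italicise_display_name(name):
--     words = name.split(" ")
--     cut = next((i for i, w in enumerate(words)
--                 if w.startswith("(") or w in ("ssp", "AMNH", "ZMUC")),
--                len(words))
--     disp = " ".join(["\\emph{"] + words[:cut] + ["}"] + words[cut:])
--     return disp.replace("{ ", "{").replace(" }", "}")
-- ===== Notes on version B (the rewrite author's own statement) =====
-- stated objective: simpler
-- what changed: Replaces A's stateful append loop with locating the first cut word (next/enumerate) and building the list by slicing words[:cut] and words[cut:] around \emph{ and }.
import Mathlib
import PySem

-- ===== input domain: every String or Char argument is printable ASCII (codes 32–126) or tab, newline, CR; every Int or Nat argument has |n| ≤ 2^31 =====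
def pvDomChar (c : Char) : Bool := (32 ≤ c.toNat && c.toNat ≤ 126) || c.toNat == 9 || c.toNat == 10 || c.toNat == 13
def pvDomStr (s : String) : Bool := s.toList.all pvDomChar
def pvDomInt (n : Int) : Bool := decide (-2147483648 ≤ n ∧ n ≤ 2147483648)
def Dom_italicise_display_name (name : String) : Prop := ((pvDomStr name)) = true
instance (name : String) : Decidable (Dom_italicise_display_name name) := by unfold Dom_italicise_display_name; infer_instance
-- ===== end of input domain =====

-- B builds the word list by locating the first cut word and slicing, instead of A's stateful
-- append loop; same output, objective: simpler.

-- ===== PORT A =====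
-- the for-loop: state machine over fields, appending to it_name
def pvLoopA : List String → List String → Int → (List String × Int)
  | [], acc, state => (acc, state)
  | f :: rest, acc, state =>
      if state == 1 && (PySem.Str.startswith f "(" || f == "ssp" || f == "AMNH" || f == "ZMUC")
      then pvLoopA rest (acc ++ ["}"] ++ [f]) 0
      else pvLoopA rest (acc ++ [f]) state

def italicise_display_name (name : String) : String :=
  let r := pvLoopA ((PySem.Str.split? name " ").getD []) ["\\emph{"] 1
  let it_name := if r.2 == 1 then r.1 ++ ["}"] else r.1
  let disp_name := PySem.Str.join " " it_name
  let disp_name := PySem.Str.replace disp_name "{ " "{"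
  PySem.Str.replace disp_name " }" "}"

-- ===== PORT B =====
def pvCut (w : String) : Bool :=
  PySem.Str.startswith w "(" || w == "ssp" || w == "AMNH" || w == "ZMUC"

def italicise_display_name_alt (name : String) : String :=
  let words := (PySem.Str.split? name " ").getD []
  let cut := words.findIdx pvCut
  let disp := PySem.Str.join " " (["\\emph{"] ++ words.take cut ++ ["}"] ++ words.drop cut)
  PySem.Str.replace (PySem.Str.replace disp "{ " "{") " }" "}"

-- ===== PRECONDITION & SPEC =====
def Spec_italicise_display_name (name : String) (out : String) : Prop := out = italicise_display_name_alt name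
instance (name : String) (out : String) : Decidable (Spec_italicise_display_name name out) := by unfold Spec_italicise_display_name; infer_instance

-- ===== CLAIM (what is proved, stated in full; the proofs are below) =====
def Claim_equal_italicise_display_name : Prop := ∀ (name : String), Dom_italicise_display_name name → Spec_italicise_display_name name (italicise_display_name name)

-- ===== LEMMAS AND PROOFS =====
theorem pvLoopA_zero (ws acc : List String) : pvLoopA ws acc 0 = (acc ++ ws, 0) := by
  induction ws generalizing acc with
  | nil => simp [pvLoopA]
  | cons w rest ih => simp [pvLoopA, ih]

theorem pvLoopA_one (ws acc : List String) :
    (let r := pvLoopA ws acc 1; if r.2 == 1 then r.1 ++ ["}"] else r.1)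
      = acc ++ ws.take (ws.findIdx pvCut) ++ ["}"] ++ ws.drop (ws.findIdx pvCut) := by
  induction ws generalizing acc with
  | nil => simp [pvLoopA]
  | cons w rest ih =>
      by_cases h : pvCut w = true
      · have h' : (PySem.Str.startswith w "(" || w == "ssp" || w == "AMNH" || w == "ZMUC") = true := h
        simp only [pvLoopA, h', Bool.and_true, if_true, beq_self_eq_true]
        simp [pvLoopA_zero, List.findIdx_cons, h]
      · have h' : (PySem.Str.startswith w "(" || w == "ssp" || w == "AMNH" || w == "ZMUC") = false :=
          by simpa [pvCut] using h
        have hb : pvCut w = false := by simpa [pvCut] using h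
        simp only [pvLoopA, h', Bool.and_false]
        have h1 := ih (acc ++ [w])
        simp only [beq_iff_eq] at h1
        simp [List.findIdx_cons, hb, List.take_succ_cons, List.drop_succ_cons, h1]

-- ===== VERDICT (by name: the statement is the Claim_ definition above) =====
theorem italicise_display_name_spec : Claim_equal_italicise_display_name := by
  intro name _
  unfold Spec_italicise_display_name italicise_display_name italicise_display_name_alt
  have h1 := pvLoopA_one ((PySem.Str.split? name " ").getD []) ["\\emph{"]
  simp only [beq_iff_eq] at h1
  simp [h1]
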